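-- pv_equiv track=rewrite | github.com/Electrikoh/AoC-2024 | day9/9.py | findFreeBlock
-- ===== SOURCE A (Python) =====
-- def findFreeBlock(layout, startPos, length):
--     if startPos == 0:
--         return None
--     curStart = None
--     curCount = 0
--     for i in range(startPos):
--         if layout[i] == ".":
--             if curStart is None:
--                 curStart = i
--                 curCount = 1
--             else:
--                 curCount += 1
--         else:
--             if curCount >= length:
--                 return curStart
--             curStart = None
--             curCount = 0
--     if curStart is not None and curCount >= length:
--         return curStart
--     return None
-- ===== SOURCE B (Python) =====
-- def findFreeBlock(layout, startPos, length):
--     # stage 1: indices of free cells in the prefix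
--     free = [i for i in range(startPos) if layout[i] == "."]
--     # stage 2: merge consecutive free indices into maximal runs [start, count]
--     runs = []
--     for d in free:
--         if runs and runs[-1][0] + runs[-1][1] == d:
--             runs[-1][1] += 1
--         else:
--             runs.append([d, 1])
--     # stage 3: first run long enough
--     for start, count in runs:
--         if count >= length:
--             return start
--     return None
-- ===== Notes on version B (the rewrite author's own statement) =====
-- stated objective: alternative
-- what changed: B replaces A's single-pass curStart/curCount state machine by a staged pipeline: collect the indices of free cells in the prefix, merge consecutive indices into a list of (start, count) runs, then search that run table for the first run of sufficient count.
-- intended difference: For non-positive requested length with a free cell ('.') somewhere in the prefix but a non-free first element, A returns None (it tests its run counter before any run has started), while B returns the index of the first free cell, the intended value since any free run satisfies a non-positive length requirement. — e.g. on findFreeBlock(["x", "."], 2, 0): A returns none, B returns some 1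
-- outside the precondition, e.g. on findFreeBlock(['x', '.'], 5, 0): A returns None, B raises IndexError; on findFreeBlock(['.', 'x'], 5, 1): A returns 0, B raises IndexError
import Mathlib
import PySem

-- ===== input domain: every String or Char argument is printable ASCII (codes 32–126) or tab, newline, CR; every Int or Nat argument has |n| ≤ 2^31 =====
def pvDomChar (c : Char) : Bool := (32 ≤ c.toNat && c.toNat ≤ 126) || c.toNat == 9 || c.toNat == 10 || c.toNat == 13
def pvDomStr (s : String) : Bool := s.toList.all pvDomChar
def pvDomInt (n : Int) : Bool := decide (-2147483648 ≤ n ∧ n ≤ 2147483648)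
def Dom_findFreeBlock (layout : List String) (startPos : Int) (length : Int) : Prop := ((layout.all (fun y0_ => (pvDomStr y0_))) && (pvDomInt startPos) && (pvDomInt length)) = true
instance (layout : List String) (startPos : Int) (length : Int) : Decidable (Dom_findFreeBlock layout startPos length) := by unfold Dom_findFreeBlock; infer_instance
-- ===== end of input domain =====

-- B replaces A's per-element curStart/curCount state machine by a staged pipeline
-- (collect free indices, merge them into a run table, search the table); same linear cost.


-- ===== PORT A =====
-- the for-loop over range(startPos) with state (curStart, curCount); pyGet? none = IndexError (outside Pre_)
def findFreeBlockLoop (layout : List String) (startPos : Int) (length : Int)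
    (i : Int) (curStart : Option Int) (curCount : Int) : Option Int :=
  if h : i < startPos then
    match PySem.List.pyGet? layout i with
    | none => none   -- IndexError; excluded by Pre_
    | some c =>
      if c = "." then
        match curStart with
        | none => findFreeBlockLoop layout startPos length (i+1) (some i) 1
        | some s => findFreeBlockLoop layout startPos length (i+1) (some s) (curCount+1)
      else
        if curCount ≥ length then curStart
        else findFreeBlockLoop layout startPos length (i+1) none 0
  else
    match curStart with
    | some s => if curCount ≥ length then some s else none
    | none => none
termination_by (startPos - i).toNat
decreasing_by all_goals (simp_wf; omega)

def findFreeBlock (layout : List String) (startPos : Int) (length : Int) : Option Int :=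
  if startPos = 0 then none
  else findFreeBlockLoop layout startPos length 0 none 0

-- ===== PORT B =====
-- stage 1: [i for i in range(startPos) if layout[i] == "."]
-- (pyGet? = some "." is exact within Pre_; outside Pre_ the Python raises IndexError)
def isDotAt (layout : List String) (i : Int) : Bool :=
  PySem.List.pyGet? layout i == some "."

def collectFree (layout : List String) (startPos : Int) : List Int :=
  (PySem.List.pyRange 0 startPos 1).filter (isDotAt layout)

-- stage 2: merge consecutive free indices into maximal runs (start, count); mirrors the
-- Python loop's runs[-1] test/update (getLast?/dropLast) and append
def mergeStep (runs : List (Int × Int)) (d : Int) : List (Int × Int) :=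
  match runs.getLast? with
  | some (s, c) => if s + c == d then runs.dropLast ++ [(s, c + 1)] else runs ++ [(d, 1)]
  | none => [(d, 1)]

def mergeRuns (free : List Int) : List (Int × Int) :=
  free.foldl mergeStep []

-- stage 3: first run with count >= length
def searchRuns (runs : List (Int × Int)) (length : Int) : Option Int :=
  match runs with
  | [] => none
  | (s, c) :: rest => if c ≥ length then some s else searchRuns rest length

def findFreeBlock_alt (layout : List String) (startPos : Int) (length : Int) : Option Int :=
  searchRuns (mergeRuns (collectFree layout startPos)) length

-- ===== PRECONDITION & SPEC =====
-- Pre_ excludes startPos > len(layout): there A raises IndexError unless an early return fires first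
-- (and B raises IndexError while building the free list); startPos is a position in layout, so this is the natural domain.
def Pre_findFreeBlock (layout : List String) (startPos : Int) (length : Int) : Prop :=
  startPos ≤ (layout.length : Int)
instance (layout : List String) (startPos : Int) (length : Int) : Decidable (Pre_findFreeBlock layout startPos length) := by unfold Pre_findFreeBlock; infer_instance

def pvWitness_findFreeBlock : List String × Int × Int := ([".", "x", "."], 3, 1)

-- For non-positive length with a "." cell in the prefix but a non-"." first element, A returns none
-- (it tests its run counter before any run has started) while B returns the first free index,
-- the intended value since any free run satisfies a non-positive length requirement.
def D_findFreeBlock (layout : List String) (startPos : Int) (length : Int) : Prop :=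
  length ≤ 0 ∧ 1 ≤ startPos ∧ layout.head? ≠ some "." ∧ "." ∈ layout.take startPos.toNat
instance (layout : List String) (startPos : Int) (length : Int) : Decidable (D_findFreeBlock layout startPos length) := by unfold D_findFreeBlock; infer_instance

def Spec_findFreeBlock (layout : List String) (startPos : Int) (length : Int) (out : Option Int) : Prop := ¬ D_findFreeBlock layout startPos length → out = findFreeBlock_alt layout startPos length
instance (layout : List String) (startPos : Int) (length : Int) (out : Option Int) : Decidable (Spec_findFreeBlock layout startPos length out) := by unfold Spec_findFreeBlock; infer_instance

def pvDiffWitness_findFreeBlock : List String × Int × Int := (["x", "."], 2, 0)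
def pvDiffWitnessOut_findFreeBlock : (Option Int) × (Option Int) := (none, some 1)

-- ===== CLAIM (what is proved, stated in full; the proofs are below) =====
def Claim_unchanged_findFreeBlock : Prop := ∀ (layout : List String) (startPos : Int) (length : Int), Dom_findFreeBlock layout startPos length → Pre_findFreeBlock layout startPos length → Spec_findFreeBlock layout startPos length (findFreeBlock layout startPos length)
def Claim_changed_findFreeBlock : Prop := Dom_findFreeBlock (pvDiffWitness_findFreeBlock.1) (pvDiffWitness_findFreeBlock.2.1) (pvDiffWitness_findFreeBlock.2.2) ∧ Pre_findFreeBlock (pvDiffWitness_findFreeBlock.1) (pvDiffWitness_findFreeBlock.2.1) (pvDiffWitness_findFreeBlock.2.2) ∧ D_findFreeBlock (pvDiffWitness_findFreeBlock.1) (pvDiffWitness_findFreeBlock.2.1) (pvDiffWitness_findFreeBlock.2.2) ∧ findFreeBlock (pvDiffWitness_findFreeBlock.1) (pvDiffWitness_findFreeBlock.2.1) (pvDiffWitness_findFreeBlock.2.2) = pvDiffWitnessOut_findFreeBlock.1 ∧ findFreeBlock_alt (pvDiffWitness_findFreeBlock.1) (pvDiffWitness_findFreeBlock.2.1) (pvDiffWitness_findFreeBlock.2.2)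 = pvDiffWitnessOut_findFreeBlock.2 ∧ pvDiffWitnessOut_findFreeBlock.1 ≠ pvDiffWitnessOut_findFreeBlock.2
def Claim_exact_findFreeBlock : Prop := ∀ (layout : List String) (startPos : Int) (length : Int), Dom_findFreeBlock layout startPos length → Pre_findFreeBlock layout startPos length → D_findFreeBlock layout startPos length → findFreeBlock layout startPos length ≠ findFreeBlock_alt layout startPos length

-- ===== LEMMAS AND PROOFS =====

theorem pyGet_ex (layout : List String) (i : Int) (h0 : 0 ≤ i)
    (h1 : i < (layout.length : Int)) :
    ∃ c, PySem.List.pyGet? layout i = some c :=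
  ⟨_, PySem.List.pyGet?_eq_some_getElem layout h0 h1⟩

-- step/stop lemmas for A's loop
theorem aloop_stop_none (layout : List String) (startPos length i cc : Int)
    (h : ¬ i < startPos) :
    findFreeBlockLoop layout startPos length i none cc = none := by
  conv_lhs => rw [findFreeBlockLoop.eq_def]
  rw [dif_neg h]

theorem aloop_stop_some (layout : List String) (startPos length i s cc : Int)
    (h : ¬ i < startPos) :
    findFreeBlockLoop layout startPos length i (some s) cc =
      if cc ≥ length then some s else none := by
  conv_lhs => rw [findFreeBlockLoop.eq_def]
  rw [dif_neg h]

theorem aloop_dot_none (layout : List String) (startPos length i cc : Int)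
    (h : i < startPos) {c : String} (hget : PySem.List.pyGet? layout i = some c)
    (hdot : c = ".") :
    findFreeBlockLoop layout startPos length i none cc =
      findFreeBlockLoop layout startPos length (i+1) (some i) 1 := by
  conv_lhs => rw [findFreeBlockLoop.eq_def]
  rw [dif_pos h, hget]
  simp only [hdot, reduceIte]

theorem aloop_dot_some (layout : List String) (startPos length i s cc : Int)
    (h : i < startPos) {c : String} (hget : PySem.List.pyGet? layout i = some c)
    (hdot : c = ".") :
    findFreeBlockLoop layout startPos length i (some s) cc =
      findFreeBlockLoop layout startPos length (i+1) (some s) (cc+1) := by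
  conv_lhs => rw [findFreeBlockLoop.eq_def]
  rw [dif_pos h, hget]
  simp only [hdot, reduceIte]

theorem aloop_nodot (layout : List String) (startPos length i cc : Int)
    (cs : Option Int) (h : i < startPos) {c : String}
    (hget : PySem.List.pyGet? layout i = some c) (hdot : ¬ c = ".") :
    findFreeBlockLoop layout startPos length i cs cc =
      if cc ≥ length then cs
      else findFreeBlockLoop layout startPos length (i+1) none 0 := by
  conv_lhs => rw [findFreeBlockLoop.eq_def]
  rw [dif_pos h, hget]
  cases cs <;> simp only [if_neg hdot]

-- PROOF-ONLY intermediary: the maximal-free-run view of the prefix, used to relate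
-- A's state machine to B's run table. findFreeRunEnd finds the end of the free run
-- starting at j; findFreeAltLoop scans run by run.
def findFreeRunEnd (layout : List String) (startPos : Int) (j : Int) : Option Int :=
  if h : j < startPos then
    match PySem.List.pyGet? layout j with
    | none => none
    | some c => if c = "." then findFreeRunEnd layout startPos (j+1) else some j
  else some j
termination_by (startPos - j).toNat
decreasing_by simp_wf; omega

theorem findFreeRunEnd_ge (layout : List String) (startPos : Int) :
    ∀ j j', findFreeRunEnd layout startPos j = some j' → j ≤ j' := by
  have key : ∀ n : Nat, ∀ j j' : Int, (startPos - j).toNat ≤ n →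
      findFreeRunEnd layout startPos j = some j' → j ≤ j' := by
    intro n
    induction n with
    | zero =>
      intro j j' hn hj'
      rw [findFreeRunEnd, dif_neg (by omega : ¬ j < startPos)] at hj'
      simp only [Option.some.injEq] at hj'
      omega
    | succ n ih =>
      intro j j' hn hj'
      by_cases hend : j < startPos
      case neg =>
        rw [findFreeRunEnd, dif_neg hend] at hj'
        simp only [Option.some.injEq] at hj'
        omega
      case pos =>
        rw [findFreeRunEnd, dif_pos hend] at hj'
        cases hget : PySem.List.pyGet? layout j with
        | none => rw [hget] at hj'; exact absurd hj' (by simp)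
        | some c =>
          rw [hget] at hj'
          by_cases hdot : c = "."
          · simp only [hdot] at hj'
            have := ih (j+1) j' (by omega) hj'
            omega
          · simp only [if_neg hdot, Option.some.injEq] at hj'
            omega
  intro j j' h
  exact key (startPos - j).toNat j j' (le_refl _) h

def findFreeAltLoop (layout : List String) (startPos : Int) (length : Int) (i : Int) : Option Int :=
  if h : i < startPos then
    match PySem.List.pyGet? layout i with
    | none => none
    | some c =>
      if c = "." then
        match hr : findFreeRunEnd layout startPos (i+1) with
        | none => none
        | some j =>
          if j - i ≥ length then some i
          else findFreeAltLoop layout startPos length j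
      else findFreeAltLoop layout startPos length (i+1)
  else none
termination_by (startPos - i).toNat
decreasing_by
  · have := findFreeRunEnd_ge layout startPos (i+1) j hr
    simp_wf; omega
  · simp_wf; omega

theorem runEnd_stop (layout : List String) (startPos j : Int) (h : ¬ j < startPos) :
    findFreeRunEnd layout startPos j = some j := by
  conv_lhs => rw [findFreeRunEnd.eq_def]
  rw [dif_neg h]

theorem runEnd_step_dot (layout : List String) (startPos j : Int)
    (h : j < startPos) {c : String} (hget : PySem.List.pyGet? layout j = some c)
    (hdot : c = ".") :
    findFreeRunEnd layout startPos j = findFreeRunEnd layout startPos (j+1) := by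
  conv_lhs => rw [findFreeRunEnd.eq_def]
  rw [dif_pos h, hget]
  simp only [hdot, reduceIte]

theorem runEnd_step_nodot (layout : List String) (startPos j : Int)
    (h : j < startPos) {c : String} (hget : PySem.List.pyGet? layout j = some c)
    (hdot : ¬ c = ".") :
    findFreeRunEnd layout startPos j = some j := by
  conv_lhs => rw [findFreeRunEnd.eq_def]
  rw [dif_pos h, hget]
  simp only [if_neg hdot]

theorem altLoop_stop (layout : List String) (startPos length i : Int)
    (h : ¬ i < startPos) : findFreeAltLoop layout startPos length i = none := by
  conv_lhs => rw [findFreeAltLoop.eq_def]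
  rw [dif_neg h]

theorem altLoop_step_dot (layout : List String) (startPos length i j : Int)
    (h : i < startPos) {c : String} (hget : PySem.List.pyGet? layout i = some c)
    (hdot : c = ".") (hj : findFreeRunEnd layout startPos (i+1) = some j) :
    findFreeAltLoop layout startPos length i =
      (if j - i ≥ length then some i
       else findFreeAltLoop layout startPos length j) := by
  conv_lhs => rw [findFreeAltLoop.eq_def]
  rw [dif_pos h, hget]
  simp only [hdot, reduceIte]
  split
  case _ heq => rw [heq] at hj; cases hj
  case _ j' heq =>
    rw [heq] at hj
    injection hj with hj'
    subst hj'
    rfl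

theorem altLoop_step_nodot (layout : List String) (startPos length i : Int)
    (h : i < startPos) {c : String} (hget : PySem.List.pyGet? layout i = some c)
    (hdot : ¬ c = ".") :
    findFreeAltLoop layout startPos length i =
      findFreeAltLoop layout startPos length (i+1) := by
  conv_lhs => rw [findFreeAltLoop.eq_def]
  rw [dif_pos h, hget]
  simp only [if_neg hdot]

-- the run end exists whenever startPos ≤ len
theorem runEnd_some (layout : List String) (startPos : Int)
    (hpre : startPos ≤ (layout.length : Int)) :
    ∀ n : Nat, ∀ j : Int, 0 ≤ j → (startPos - j).toNat ≤ n →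
      ∃ j', findFreeRunEnd layout startPos j = some j' := by
  intro n
  induction n with
  | zero =>
    intro j h0 hn
    exact ⟨j, runEnd_stop layout startPos j (by omega)⟩
  | succ n ih =>
    intro j h0 hn
    by_cases hend : j < startPos
    case neg => exact ⟨j, runEnd_stop layout startPos j hend⟩
    case pos =>
      obtain ⟨c, hget⟩ := pyGet_ex layout j h0 (by omega)
      by_cases hdot : c = "."
      · rw [runEnd_step_dot layout startPos j hend hget hdot]
        exact ih (j+1) (by omega) (by omega)
      · exact ⟨j, runEnd_step_nodot layout startPos j hend hget hdot⟩

-- ==== bridge from B's pipeline to the run-by-run view ====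

-- recursive form of the run-merging fold
def mergeFrom (s c : Int) : List Int → List (Int × Int)
  | [] => [(s, c)]
  | d :: ds => if s + c = d then mergeFrom s (c + 1) ds else (s, c) :: mergeFrom d 1 ds

def mergeRunsRec : List Int → List (Int × Int)
  | [] => []
  | d :: ds => mergeFrom d 1 ds

theorem foldl_mergeStep (ds : List Int) :
    ∀ (rs : List (Int × Int)) (s c : Int),
      ds.foldl mergeStep (rs ++ [(s, c)]) = rs ++ mergeFrom s c ds := by
  induction ds with
  | nil => intro rs s c; simp [mergeFrom]
  | cons d ds ih =>
    intro rs s c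
    have hstep : mergeStep (rs ++ [(s, c)]) d =
        if s + c = d then rs ++ [(s, c + 1)] else (rs ++ [(s, c)]) ++ [(d, 1)] := by
      rw [mergeStep, List.getLast?_concat]
      by_cases h : s + c = d
      · simp [h]
      · simp [h]
    rw [List.foldl_cons, hstep]
    by_cases h : s + c = d
    · rw [if_pos h, ih rs s (c + 1), mergeFrom, if_pos h]
    · rw [if_neg h, ih (rs ++ [(s, c)]) d 1, mergeFrom, if_neg h,
        List.append_assoc, List.singleton_append]

theorem mergeRuns_eq_rec (l : List Int) : mergeRuns l = mergeRunsRec l := by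
  cases l with
  | nil => rfl
  | cons d ds =>
    have h0 : mergeStep [] d = [] ++ [(d, 1)] := by rw [mergeStep]; rfl
    rw [mergeRuns, List.foldl_cons, h0, foldl_mergeStep ds [] d 1, mergeRunsRec,
      List.nil_append]

-- the free-index list from position i on
def freeFrom (layout : List String) (startPos i : Int) : List Int :=
  (PySem.List.pyRange i startPos 1).filter (isDotAt layout)

theorem freeFrom_stop (layout : List String) (startPos i : Int) (h : ¬ i < startPos) :
    freeFrom layout startPos i = [] := by
  rw [freeFrom, PySem.List.pyRange_one_eq_nil (by omega), List.filter_nil]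

theorem freeFrom_cons_dot (layout : List String) (startPos i : Int) (h : i < startPos)
    {c : String} (hget : PySem.List.pyGet? layout i = some c) (hdot : c = ".") :
    freeFrom layout startPos i = i :: freeFrom layout startPos (i+1) := by
  rw [freeFrom, PySem.List.pyRange_one_cons h, List.filter_cons,
    if_pos (by simp [isDotAt, hget, hdot]), freeFrom]

theorem freeFrom_cons_nodot (layout : List String) (startPos i : Int) (h : i < startPos)
    {c : String} (hget : PySem.List.pyGet? layout i = some c) (hdot : ¬ c = ".") :
    freeFrom layout startPos i = freeFrom layout startPos (i+1) := by
  rw [freeFrom, PySem.List.pyRange_one_cons h, List.filter_cons,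
    if_neg (by simp [isDotAt, hget, hdot]), freeFrom]

theorem freeFrom_mem_ge (layout : List String) (startPos i x : Int)
    (hx : x ∈ freeFrom layout startPos i) : i ≤ x := by
  rw [freeFrom, List.mem_filter] at hx
  exact ((PySem.List.mem_pyRange_one).1 hx.1).1

-- merging from a started run (s, c) with s + c = i follows the free run up to its end j
theorem mergeFrom_run (layout : List String) (startPos : Int)
    (hpre : startPos ≤ (layout.length : Int)) :
    ∀ n : Nat, ∀ i s c j : Int, 0 ≤ i → (startPos - i).toNat ≤ n → s + c = i →
      findFreeRunEnd layout startPos i = some j →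
      mergeFrom s c (freeFrom layout startPos i) =
        (s, c + (j - i)) :: mergeRunsRec (freeFrom layout startPos j) := by
  intro n
  induction n with
  | zero =>
    intro i s c j h0 hn hsc hj
    rw [runEnd_stop layout startPos i (by omega)] at hj
    injection hj with hji
    subst hji
    rw [freeFrom_stop layout startPos i (by omega)]
    simp [mergeFrom, mergeRunsRec]
  | succ n ih =>
    intro i s c j h0 hn hsc hj
    by_cases hend : i < startPos
    case neg =>
      rw [runEnd_stop layout startPos i hend] at hj
      injection hj with hji
      subst hji
      rw [freeFrom_stop layout startPos i hend]
      simp [mergeFrom, mergeRunsRec]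
    case pos =>
      obtain ⟨c', hget⟩ := pyGet_ex layout i h0 (by omega)
      by_cases hdot : c' = "."
      · rw [runEnd_step_dot layout startPos i hend hget hdot] at hj
        rw [freeFrom_cons_dot layout startPos i hend hget hdot, mergeFrom,
          if_pos hsc,
          ih (i+1) s (c+1) j (by omega) (by omega) (by omega) hj]
        have : c + 1 + (j - (i + 1)) = c + (j - i) := by omega
        rw [this]
      · rw [runEnd_step_nodot layout startPos i hend hget hdot] at hj
        injection hj with hji
        subst hji
        rw [freeFrom_cons_nodot layout startPos i hend hget hdot]
        have hji0 : c + (i - i) = c := by omega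
        rw [hji0]
        cases hf : freeFrom layout startPos (i+1) with
        | nil => simp [mergeFrom, mergeRunsRec]
        | cons h t =>
          have hh : i + 1 ≤ h := freeFrom_mem_ge layout startPos (i+1) h (by rw [hf]; exact List.mem_cons_self)
          rw [mergeFrom, if_neg (by omega), mergeRunsRec]

-- B's pipeline from position i equals the run-by-run scan from i
theorem pipeline_eq_altLoop (layout : List String) (startPos length : Int)
    (hpre : startPos ≤ (layout.length : Int)) :
    ∀ n : Nat, ∀ i : Int, 0 ≤ i → (startPos - i).toNat ≤ n →
      searchRuns (mergeRunsRec (freeFrom layout startPos i)) length =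
        findFreeAltLoop layout startPos length i := by
  intro n
  induction n with
  | zero =>
    intro i h0 hn
    rw [freeFrom_stop layout startPos i (by omega),
      altLoop_stop layout startPos length i (by omega)]
    rfl
  | succ n ih =>
    intro i h0 hn
    by_cases hend : i < startPos
    case neg =>
      rw [freeFrom_stop layout startPos i hend,
        altLoop_stop layout startPos length i hend]
      rfl
    case pos =>
      obtain ⟨c, hget⟩ := pyGet_ex layout i h0 (by omega)
      by_cases hdot : c = "."
      · obtain ⟨j, hj⟩ := runEnd_some layout startPos hpre (startPos - (i+1)).toNat (i+1) (by omega) (le_refl _)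
        have hge := findFreeRunEnd_ge layout startPos (i+1) j hj
        rw [freeFrom_cons_dot layout startPos i hend hget hdot, mergeRunsRec,
          mergeFrom_run layout startPos hpre (startPos - (i+1)).toNat (i+1) i 1 j
            (by omega) (le_refl _) (by omega) hj,
          altLoop_step_dot layout startPos length i j hend hget hdot hj]
        have hcnt : 1 + (j - (i + 1)) = j - i := by omega
        rw [searchRuns, hcnt]
        by_cases hlen : j - i ≥ length
        · rw [if_pos hlen, if_pos hlen]
        · rw [if_neg hlen, if_neg hlen]
          exact ih j (by omega) (by omega)
      · rw [freeFrom_cons_nodot layout startPos i hend hget hdot,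
          altLoop_step_nodot layout startPos length i hend hget hdot]
        exact ih (i+1) (by omega) (by omega)

theorem alt_eq_altLoop (layout : List String) (startPos length : Int)
    (hpre : startPos ≤ (layout.length : Int)) :
    findFreeBlock_alt layout startPos length = findFreeAltLoop layout startPos length 0 := by
  rw [findFreeBlock_alt, mergeRuns_eq_rec]
  exact pipeline_eq_altLoop layout startPos length hpre (startPos - 0).toNat 0 (le_refl _) (le_refl _)

-- ==== relating A's loop to the run-by-run view ====

-- the combined induction: from a clean state A's loop equals the run scan, and from a run state
-- (started at s, all "." on [s, i)) A's loop equals the decision about that run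
theorem main_ind (layout : List String) (startPos length : Int)
    (hpre : startPos ≤ (layout.length : Int)) (hlen : 1 ≤ length) :
    ∀ n : Nat, ∀ i : Int, 0 ≤ i → (startPos - i).toNat ≤ n →
      (findFreeBlockLoop layout startPos length i none 0 = findFreeAltLoop layout startPos length i)
      ∧ (∀ s : Int, 0 ≤ s → s < i →
          (∀ k : Int, s ≤ k → k < i → PySem.List.pyGet? layout k = some ".") →
          ∀ j : Int, findFreeRunEnd layout startPos i = some j →
          findFreeBlockLoop layout startPos length i (some s) (i - s) =
            (if j - s ≥ length then some s
             else findFreeAltLoop layout startPos length j)) := by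
  intro n
  induction n with
  | zero =>
    intro i h0 hn
    have hend : ¬ i < startPos := by omega
    refine ⟨?_, ?_⟩
    · rw [aloop_stop_none layout startPos length i 0 hend,
        altLoop_stop layout startPos length i hend]
    · intro s hs0 hsi hdots j hj
      rw [runEnd_stop layout startPos i hend] at hj
      injection hj with hji
      subst hji
      rw [aloop_stop_some layout startPos length i s (i - s) hend,
        altLoop_stop layout startPos length i hend]
  | succ n ih =>
    intro i h0 hn
    by_cases hend : i < startPos
    case neg =>
      refine ⟨?_, ?_⟩
      · rw [aloop_stop_none layout startPos length i 0 hend,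
          altLoop_stop layout startPos length i hend]
      · intro s hs0 hsi hdots j hj
        rw [runEnd_stop layout startPos i hend] at hj
        injection hj with hji
        subst hji
        rw [aloop_stop_some layout startPos length i s (i - s) hend,
          altLoop_stop layout startPos length i hend]
    case pos =>
      obtain ⟨c, hget⟩ := pyGet_ex layout i h0 (by omega)
      have hn' : (startPos - (i + 1)).toNat ≤ n := by omega
      refine ⟨?_, ?_⟩
      · -- clean state
        by_cases hdot : c = "."
        · rw [aloop_dot_none layout startPos length i 0 hend hget hdot]
          obtain ⟨j, hj⟩ := runEnd_some layout startPos hpre (startPos - (i+1)).toNat (i+1) (by omega) (le_refl _)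
          have step := (ih (i+1) (by omega) hn').2 i h0 (by omega)
            (by intro k hk1 hk2
                have hki : k = i := by omega
                subst hki; rw [hget, hdot]) j hj
          have h1 : (i+1) - i = (1 : Int) := by omega
          rw [h1] at step
          rw [step, altLoop_step_dot layout startPos length i j hend hget hdot hj]
        · rw [aloop_nodot layout startPos length i 0 none hend hget hdot,
            if_neg (by omega : ¬ (0 : Int) ≥ length), (ih (i+1) (by omega) hn').1,
            altLoop_step_nodot layout startPos length i hend hget hdot]
      · -- run state
        intro s hs0 hsi hdots j hj
        by_cases hdot : c = "."
        · rw [aloop_dot_some layout startPos length i s (i - s) hend hget hdot]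
          rw [runEnd_step_dot layout startPos i hend hget hdot] at hj
          have step := (ih (i+1) (by omega) hn').2 s hs0 (by omega)
            (by intro k hk1 hk2
                by_cases hki : k = i
                · subst hki; rw [hget, hdot]
                · exact hdots k hk1 (by omega)) j hj
          have h1 : (i+1) - s = i - s + 1 := by omega
          rw [h1] at step
          rw [step]
        · rw [runEnd_step_nodot layout startPos i hend hget hdot] at hj
          injection hj with hji
          subst hji
          rw [aloop_nodot layout startPos length i (i - s) (some s) hend hget hdot]
          by_cases hge : i - s ≥ length
          · rw [if_pos hge, if_pos hge]
          · rw [if_neg hge, if_neg hge, (ih (i+1) (by omega) hn').1,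
              altLoop_step_nodot layout startPos length i hend hget hdot]

-- length ≤ 0, run already started: A returns its start at the next decision point
theorem aloop_run_nonpos (layout : List String) (startPos length : Int)
    (hpre : startPos ≤ (layout.length : Int)) (hlen : length ≤ 0) :
    ∀ n : Nat, ∀ i : Int, 0 ≤ i → (startPos - i).toNat ≤ n →
      ∀ s cc : Int, 0 ≤ cc →
        findFreeBlockLoop layout startPos length i (some s) cc = some s := by
  intro n
  induction n with
  | zero =>
    intro i h0 hn s cc hcc
    rw [aloop_stop_some layout startPos length i s cc (by omega),
      if_pos (by omega : cc ≥ length)]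
  | succ n ih =>
    intro i h0 hn s cc hcc
    by_cases hend : i < startPos
    case neg =>
      rw [aloop_stop_some layout startPos length i s cc hend,
        if_pos (by omega : cc ≥ length)]
    case pos =>
      obtain ⟨c, hget⟩ := pyGet_ex layout i h0 (by omega)
      by_cases hdot : c = "."
      · rw [aloop_dot_some layout startPos length i s cc hend hget hdot]
        exact ih (i+1) (by omega) (by omega) s (cc+1) (by omega)
      · rw [aloop_nodot layout startPos length i cc (some s) hend hget hdot,
          if_pos (by omega : cc ≥ length)]

-- no "." at any index of [i, startPos): the run scan returns none
theorem altLoop_none_of_nodot (layout : List String) (startPos length : Int)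
    (hpre : startPos ≤ (layout.length : Int)) :
    ∀ n : Nat, ∀ i : Int, 0 ≤ i → (startPos - i).toNat ≤ n →
      (∀ k : Int, i ≤ k → k < startPos → PySem.List.pyGet? layout k ≠ some ".") →
      findFreeAltLoop layout startPos length i = none := by
  intro n
  induction n with
  | zero =>
    intro i h0 hn _
    exact altLoop_stop layout startPos length i (by omega)
  | succ n ih =>
    intro i h0 hn hnod
    by_cases hend : i < startPos
    case neg => exact altLoop_stop layout startPos length i hend
    case pos =>
      obtain ⟨c, hget⟩ := pyGet_ex layout i h0 (by omega)
      have hdot : ¬ c = "." := by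
        intro hc
        exact hnod i (by omega) hend (by rw [hget, hc])
      rw [altLoop_step_nodot layout startPos length i hend hget hdot]
      exact ih (i+1) (by omega) (by omega) (fun k hk1 hk2 => hnod k (by omega) hk2)

-- a "." at some index of [i, startPos): the run scan returns some value (length ≤ 0)
theorem altLoop_some_of_dot (layout : List String) (startPos length : Int)
    (hpre : startPos ≤ (layout.length : Int)) (hlen : length ≤ 0) :
    ∀ n : Nat, ∀ i : Int, 0 ≤ i → (startPos - i).toNat ≤ n →
      (∃ k : Int, i ≤ k ∧ k < startPos ∧ PySem.List.pyGet? layout k = some ".") →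
      ∃ r, findFreeAltLoop layout startPos length i = some r := by
  intro n
  induction n with
  | zero =>
    intro i h0 hn ⟨k, hk1, hk2, _⟩
    omega
  | succ n ih =>
    intro i h0 hn ⟨k, hk1, hk2, hkdot⟩
    have hend : i < startPos := by omega
    obtain ⟨c, hget⟩ := pyGet_ex layout i h0 (by omega)
    by_cases hdot : c = "."
    · obtain ⟨j, hj⟩ := runEnd_some layout startPos hpre (startPos - (i+1)).toNat (i+1) (by omega) (le_refl _)
      have hge := findFreeRunEnd_ge layout startPos (i+1) j hj
      rw [altLoop_step_dot layout startPos length i j hend hget hdot hj]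
      exact ⟨i, by rw [if_pos (by omega : j - i ≥ length)]⟩
    · rw [altLoop_step_nodot layout startPos length i hend hget hdot]
      have hki : k ≠ i := by
        intro hc; subst hc
        rw [hget] at hkdot
        exact hdot (by injection hkdot)
      exact ih (i+1) (by omega) (by omega) ⟨k, by omega, hk2, hkdot⟩

-- on D_: A returns none
theorem a_none_on_D (layout : List String) (startPos length : Int)
    (hpre : startPos ≤ (layout.length : Int))
    (hD : D_findFreeBlock layout startPos length) :
    findFreeBlock layout startPos length = none := by
  obtain ⟨hlen, hsp, hhead, hmem⟩ := hD
  have hne : layout ≠ [] := by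
    intro hc; subst hc; simp at hmem
  obtain ⟨c, rest, hl⟩ := List.exists_cons_of_ne_nil hne
  subst hl
  have hc : ¬ c = "." := by
    intro hc'; apply hhead; rw [hc']; rfl
  rw [findFreeBlock, if_neg (by omega : ¬ startPos = 0),
    aloop_nodot (c :: rest) startPos length 0 0 none (by omega)
      (PySem.List.pyGet?_zero_cons c rest) hc,
    if_pos (by omega : (0 : Int) ≥ length)]

-- the dot in take startPos.toNat gives an in-range Int index holding "."
theorem dot_index_of_mem_take (layout : List String) (startPos : Int)
    (hpre : startPos ≤ (layout.length : Int))
    (hmem : "." ∈ layout.take startPos.toNat) :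
    ∃ k : Int, 0 ≤ k ∧ k < startPos ∧ PySem.List.pyGet? layout k = some "." := by
  obtain ⟨m, hm, hval⟩ := List.getElem_of_mem hmem
  rw [List.length_take] at hm
  have hmlen : m < layout.length := by omega
  refine ⟨(m : Int), by omega, by omega, ?_⟩
  rw [PySem.List.pyGet?_natCast]
  rw [List.getElem_take] at hval
  simp [List.getElem?_eq_getElem hmlen, hval]

-- ===== VERDICT (by name: the statement is the Claim_ definition above) =====
theorem findFreeBlock_spec : Claim_unchanged_findFreeBlock := by
  intro layout startPos length _hdom hpre hnD
  unfold Pre_findFreeBlock at hpre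
  rw [alt_eq_altLoop layout startPos length hpre]
  by_cases hlen : 1 ≤ length
  · by_cases hsp : startPos = 0
    · subst hsp
      rw [findFreeBlock, if_pos rfl, altLoop_stop layout 0 length 0 (by omega)]
    · rw [findFreeBlock, if_neg hsp]
      exact (main_ind layout startPos length hpre hlen (startPos - 0).toNat 0 (le_refl _) (le_refl _)).1
  · have hlen' : length ≤ 0 := by omega
    by_cases hsp : 1 ≤ startPos
    case neg =>
      rw [altLoop_stop layout startPos length 0 (by omega)]
      by_cases h0 : startPos = 0
      · rw [findFreeBlock, if_pos h0]
      · rw [findFreeBlock, if_neg h0, aloop_stop_none layout startPos length 0 0 (by omega)]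
    case pos =>
      have hne : layout ≠ [] := by
        intro hc; subst hc; simp at hpre; omega
      obtain ⟨c, rest, hl⟩ := List.exists_cons_of_ne_nil hne
      by_cases hhead : c = "."
      · -- leading free cell: both return 0
        subst hl
        obtain ⟨j, hj⟩ := runEnd_some (c :: rest) startPos hpre (startPos - (0+1)).toNat (0+1) (by omega) (le_refl _)
        have hge := findFreeRunEnd_ge (c :: rest) startPos (0+1) j hj
        rw [findFreeBlock, if_neg (by omega : ¬ startPos = 0),
          aloop_dot_none (c :: rest) startPos length 0 0 (by omega)
            (PySem.List.pyGet?_zero_cons c rest) hhead,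
          aloop_run_nonpos (c :: rest) startPos length hpre hlen'
            (startPos - (0+1)).toNat (0+1) (by omega) (le_refl _) 0 1 (by omega),
          altLoop_step_dot (c :: rest) startPos length 0 j (by omega)
            (PySem.List.pyGet?_zero_cons c rest) hhead hj,
          if_pos (by omega : j - 0 ≥ length)]
      · -- no leading free cell and ¬ D forces no "." in the prefix: both none
        have hnod : "." ∉ layout.take startPos.toNat := by
          intro hmem
          exact hnD ⟨hlen', hsp, by rw [hl]; simp [hhead], hmem⟩
        have hnod' : ∀ k : Int, 0 ≤ k → k < startPos → PySem.List.pyGet? layout k ≠ some "." := by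
          intro k hk1 hk2 hc'
          apply hnod
          have hklen : k.toNat < layout.length := by omega
          have hv : layout[k.toNat] = "." := by
            have hg := PySem.List.pyGet?_eq_some_getElem layout hk1 (by omega : k < (layout.length : Int))
            rw [hg] at hc'; injection hc'
          rw [← hv]
          exact List.mem_take_iff_getElem.mpr ⟨k.toNat, by omega, rfl⟩
        rw [altLoop_none_of_nodot layout startPos length hpre (startPos - 0).toNat 0
            (le_refl _) (le_refl _) (fun k hk1 hk2 => hnod' k hk1 hk2)]
        subst hl
        rw [findFreeBlock, if_neg (by omega : ¬ startPos = 0),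
          aloop_nodot (c :: rest) startPos length 0 0 none (by omega)
            (PySem.List.pyGet?_zero_cons c rest) hhead,
          if_pos (by omega : (0 : Int) ≥ length)]

theorem findFreeBlock_changed : Claim_changed_findFreeBlock := by
  unfold Claim_changed_findFreeBlock pvDiffWitness_findFreeBlock pvDiffWitnessOut_findFreeBlock
  refine ⟨by decide, by decide, by decide, ?_, by decide, by decide⟩
  · rw [findFreeBlock, if_neg (by norm_num : ¬ (2 : Int) = 0),
      aloop_nodot ["x", "."] 2 0 0 0 none (by norm_num)
        (PySem.List.pyGet?_zero_cons "x" ["."]) (by decide),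
      if_pos (by norm_num : (0 : Int) ≥ 0)]

theorem findFreeBlock_tight : Claim_exact_findFreeBlock := by
  intro layout startPos length _hdom hpre hD
  have hpre' : startPos ≤ (layout.length : Int) := hpre
  have hA := a_none_on_D layout startPos length hpre' hD
  obtain ⟨hlen, hsp, _, hmem⟩ := hD
  obtain ⟨k, hk0, hk1, hkdot⟩ := dot_index_of_mem_take layout startPos hpre' hmem
  obtain ⟨r, hr⟩ := altLoop_some_of_dot layout startPos length hpre' hlen
    (startPos - 0).toNat 0 (le_refl _) (le_refl _) ⟨k, hk0, hk1, hkdot⟩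
  rw [hA, alt_eq_altLoop layout startPos length hpre', hr]
  simp
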